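-- pv_equiv track=rewrite | github.com/Olciaaa/ASD | wakacjeZASD/8/egzP8a/egzP8a.py | maximumIncome
-- ===== SOURCE A (Python) =====
-- def maximumIncome(T, limit):
--     maximum = 0
--     for idx in range(len(T)):
--         if T[idx][0][1] > limit:
--             break
--
--         curr = T[idx][1]
--         for j in range(idx + 1, len(T)):
--             if T[j][0][1] > limit:
--                 break
--
--             if T[j][0][0] > T[idx][0][1]:
--                 curr = max(curr, T[idx][1] + T[j][1])
--         maximum = max(curr, maximum)
--     return maximum
-- ===== SOURCE B (Python) =====
-- def maximumIncome(T, limit):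
--     # collect the prefix before the first interval whose end exceeds the limit
--     prefix = []
--     for t in T:
--         if t[0][1] > limit:
--             break
--         prefix.append(t)
--     # single right-to-left pass: cands holds (start, value) of later intervals
--     # with positive value (non-positive partners can never improve a pair)
--     best = 0
--     cands = []
--     for (s, e), v in reversed(prefix):
--         q = 0
--         for cs, cv in cands:
--             if cs > e and cv > q:
--                 q = cv
--         best = max(best, v + q)
--         if v > 0:
--             cands.append((s, v))
--     return best
-- ===== Notes on version B (the rewrite author's own statement) =====
-- stated objective: alternative
-- what changed: A's index-driven nested loops (re-testing the limit break condition inside every inner scan) are replaced by one take-while pass that isolates the admissible prefix, then a single right-to-left traversal keeping an accumulator of only the positive-valued later intervals (non-positive partners can never improve a pair), with each contribution computed as value + max(0, best compatible partner); pruning the candidate list and hoisting the limit test give a constant-factor speed-up.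
import Mathlib
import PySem

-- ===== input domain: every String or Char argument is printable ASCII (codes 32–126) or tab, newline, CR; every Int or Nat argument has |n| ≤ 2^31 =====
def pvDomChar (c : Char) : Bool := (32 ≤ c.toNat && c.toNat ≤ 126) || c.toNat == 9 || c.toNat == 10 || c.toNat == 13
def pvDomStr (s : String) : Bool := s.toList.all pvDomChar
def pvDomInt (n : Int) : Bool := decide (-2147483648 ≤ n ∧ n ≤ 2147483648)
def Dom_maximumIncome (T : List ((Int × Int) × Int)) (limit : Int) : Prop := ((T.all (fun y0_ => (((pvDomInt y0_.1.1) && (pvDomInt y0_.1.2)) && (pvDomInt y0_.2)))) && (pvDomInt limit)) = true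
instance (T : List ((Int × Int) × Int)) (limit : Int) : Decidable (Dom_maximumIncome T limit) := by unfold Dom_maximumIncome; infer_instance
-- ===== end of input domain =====

-- B replaces A's index-driven nested loops (re-testing the limit inside the inner
-- loop) by one take-while pass plus a single right-to-left traversal that keeps an
-- accumulator of positive-valued later intervals; objective: alternative structure.

-- ===== PORT A =====
-- inner loop: for j in range(idx+1, len(T)) with break, accumulating curr
def aInner (T : List ((Int × Int) × Int)) (limit e vi : Int) (j : Nat) (curr : Int) : Int :=
  if h : j < T.length then
    if (T[j]).1.2 > limit then curr
    else aInner T limit e vi (j + 1)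
      (if (T[j]).1.1 > e then max curr (vi + (T[j]).2) else curr)
  else curr
termination_by T.length - j

-- outer loop: for idx in range(len(T)) with break, accumulating maximum
def aOuter (T : List ((Int × Int) × Int)) (limit : Int) (idx : Nat) (maximum : Int) : Int :=
  if h : idx < T.length then
    if (T[idx]).1.2 > limit then maximum
    else aOuter T limit (idx + 1)
      (max (aInner T limit (T[idx]).1.2 (T[idx]).2 (idx + 1) (T[idx]).2) maximum)
  else maximum
termination_by T.length - idx

def maximumIncome (T : List ((Int × Int) × Int)) (limit : Int) : Int :=
  aOuter T limit 0 0

-- ===== PORT B =====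
-- the prefix of T before the first interval whose end exceeds the limit
def altPrefix (limit : Int) : List ((Int × Int) × Int) → List ((Int × Int) × Int)
  | [] => []
  | t :: ts => if t.1.2 > limit then [] else t :: altPrefix limit ts

-- Source B's inner scan of cands computing q
def altQ (e : Int) (cands : List (Int × Int)) : Int :=
  cands.foldl (fun q c => if c.1 > e ∧ c.2 > q then c.2 else q) 0

-- one step of Source B's right-to-left loop: state = (best, cands)
def altStep (st : Int × List (Int × Int)) (t : (Int × Int) × Int) : Int × List (Int × Int) :=
  (max st.1 (t.2 + altQ t.1.2 st.2),
   if t.2 > 0 then st.2 ++ [(t.1.1, t.2)] else st.2)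

def maximumIncome_alt (T : List ((Int × Int) × Int)) (limit : Int) : Int :=
  ((altPrefix limit T).reverse.foldl altStep (0, [])).1

-- ===== PRECONDITION & SPEC =====
def Spec_maximumIncome (T : List ((Int × Int) × Int)) (limit : Int) (out : Int) : Prop := out = maximumIncome_alt T limit
instance (T : List ((Int × Int) × Int)) (limit : Int) (out : Int) : Decidable (Spec_maximumIncome T limit out) := by unfold Spec_maximumIncome; infer_instance

-- ===== CLAIM (what is proved, stated in full; the proofs are below) =====
def Claim_equal_maximumIncome : Prop := ∀ (T : List ((Int × Int) × Int)) (limit : Int), Dom_maximumIncome T limit → Spec_maximumIncome T limit (maximumIncome T limit)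

-- ===== LEMMAS AND PROOFS =====

-- list-form restatements of A's two loops
def innerL (limit e vi : Int) : List ((Int × Int) × Int) → Int → Int
  | [], c => c
  | t :: ts, c =>
    if t.1.2 > limit then c
    else innerL limit e vi ts (if t.1.1 > e then max c (vi + t.2) else c)

def outerL (limit : Int) : List ((Int × Int) × Int) → Int → Int
  | [], m => m
  | t :: ts, m =>
    if t.1.2 > limit then m
    else outerL limit ts (max (innerL limit t.1.2 t.2 ts t.2) m)

lemma aInner_eq (T : List ((Int × Int) × Int)) (limit e vi : Int) (j : Nat) (c : Int) :
    aInner T limit e vi j c = innerL limit e vi (T.drop j) c := by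
  fun_induction aInner T limit e vi j c with
  | case1 j c h hgt =>
    rw [List.drop_eq_getElem_cons h]
    simp [innerL, hgt]
  | case2 j c h hgt ih =>
    rw [List.drop_eq_getElem_cons h]
    simp only [innerL, hgt, if_false]
    exact ih
  | case3 j c h =>
    rw [List.drop_eq_nil_of_le (by omega)]
    rfl

lemma aOuter_eq (T : List ((Int × Int) × Int)) (limit : Int) (idx : Nat) (m : Int) :
    aOuter T limit idx m = outerL limit (T.drop idx) m := by
  fun_induction aOuter T limit idx m with
  | case1 idx m h hgt =>
    rw [List.drop_eq_getElem_cons h]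
    simp [outerL, hgt]
  | case2 idx m h hgt ih =>
    rw [List.drop_eq_getElem_cons h]
    simp only [outerL, hgt, if_false]
    rw [ih, aInner_eq]
  | case3 idx m h =>
    rw [List.drop_eq_nil_of_le (by omega)]
    rfl

-- innerL only visits the limit-respecting prefix
lemma innerL_prefix (limit e vi : Int) (l : List ((Int × Int) × Int)) (c : Int) :
    innerL limit e vi l c =
      (altPrefix limit l).foldl (fun c u => if u.1.1 > e then max c (vi + u.2) else c) c := by
  induction l generalizing c with
  | nil => rfl
  | cons t ts ih =>
    simp only [innerL, altPrefix]
    by_cases h : t.1.2 > limit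
    · simp [h]
    · simp only [h, ite_false, List.foldl_cons]
      exact ih _

-- A collapsed onto the prefix
def outerP : List ((Int × Int) × Int) → Int → Int
  | [], m => m
  | t :: ps, m =>
    outerP ps (max (ps.foldl (fun c u => if u.1.1 > t.1.2 then max c (t.2 + u.2) else c) t.2) m)

lemma outerL_prefix (limit : Int) (l : List ((Int × Int) × Int)) (m : Int) :
    outerL limit l m = outerP (altPrefix limit l) m := by
  induction l generalizing m with
  | nil => rfl
  | cons t ts ih =>
    simp only [outerL, altPrefix]
    by_cases h : t.1.2 > limit
    · simp [h, outerP]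
    · simp only [h, ite_false, outerP]
      rw [ih, innerL_prefix]

-- the monotone max-fold behind altQ
def mq (e : Int) (l : List (Int × Int)) (q : Int) : Int :=
  l.foldl (fun q c => if c.1 > e then max q c.2 else q) q

lemma altQfold_eq (e : Int) (l : List (Int × Int)) (q : Int) :
    l.foldl (fun q c => if c.1 > e ∧ c.2 > q then c.2 else q) q = mq e l q := by
  induction l generalizing q with
  | nil => rfl
  | cons c l ih =>
    simp only [mq, List.foldl_cons] at *
    rw [show (if c.1 > e ∧ c.2 > q then c.2 else q) = (if c.1 > e then max q c.2 else q) by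
      split_ifs <;> omega]
    exact ih _

lemma altQ_eq_mq (e : Int) (l : List (Int × Int)) : altQ e l = mq e l 0 :=
  altQfold_eq e l 0

lemma mq_max (e : Int) (l : List (Int × Int)) (a b : Int) :
    mq e l (max a b) = max (mq e l a) b := by
  induction l generalizing a with
  | nil => rfl
  | cons c l ih =>
    simp only [mq, List.foldl_cons] at *
    by_cases h : c.1 > e
    · simp only [h, if_true]
      rw [show max (max a b) c.2 = max (max a c.2) b by omega]
      exact ih _
    · simp only [h, if_false]
      exact ih _

lemma mq_nonneg (e : Int) (l : List (Int × Int)) (q : Int) (hq : 0 ≤ q) :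
    0 ≤ mq e l q := by
  induction l generalizing q with
  | nil => exact hq
  | cons c l ih =>
    simp only [mq, List.foldl_cons] at *
    by_cases h : c.1 > e
    · simp only [h, if_true]; exact ih _ (by omega)
    · simp only [h, if_false]; exact ih _ hq

lemma altQ_append (e : Int) (l1 l2 : List (Int × Int)) :
    altQ e (l1 ++ l2) = max (altQ e l1) (altQ e l2) := by
  have h1 : 0 ≤ mq e l1 0 := mq_nonneg e l1 0 le_rfl
  rw [altQ_eq_mq, altQ_eq_mq, altQ_eq_mq]
  have h2 : mq e l2 (max 0 (mq e l1 0)) = max (mq e l2 0) (mq e l1 0) := mq_max e l2 0 _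
  rw [max_eq_right h1] at h2
  have h3 : mq e (l1 ++ l2) 0 = mq e l2 (mq e l1 0) := by
    simp only [mq, List.foldl_append]
  rw [h3, h2]
  omega

lemma altQ_reverse (e : Int) (l : List (Int × Int)) :
    altQ e l.reverse = altQ e l := by
  induction l with
  | nil => rfl
  | cons c l ih =>
    rw [List.reverse_cons, altQ_append, ih]
    have hcons : altQ e (c :: l) = mq e l (if c.1 > e ∧ c.2 > 0 then c.2 else 0) := by
      rw [altQ, List.foldl_cons, altQfold_eq]
    have hsingle : altQ e [c] = (if c.1 > e ∧ c.2 > 0 then c.2 else 0) := rfl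
    have hs : 0 ≤ (if c.1 > e ∧ c.2 > 0 then c.2 else (0 : Int)) := by split_ifs <;> omega
    rw [hcons, hsingle, show (if c.1 > e ∧ c.2 > 0 then c.2 else (0:Int))
        = max 0 (if c.1 > e ∧ c.2 > 0 then c.2 else (0:Int)) by omega, mq_max, altQ_eq_mq]
    omega

-- the positive candidates Source B accumulates, in accumulation order
def pc : List ((Int × Int) × Int) → List (Int × Int)
  | [] => []
  | t :: ts => if t.2 > 0 then (t.1.1, t.2) :: pc ts else pc ts

lemma pc_append (l1 l2 : List ((Int × Int) × Int)) :
    pc (l1 ++ l2) = pc l1 ++ pc l2 := by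
  induction l1 with
  | nil => rfl
  | cons t ts ih =>
    simp only [List.cons_append, pc]
    split_ifs <;> simp [ih]

lemma pc_reverse (l : List ((Int × Int) × Int)) :
    pc l.reverse = (pc l).reverse := by
  induction l with
  | nil => rfl
  | cons t ts ih =>
    rw [List.reverse_cons, pc_append, ih]
    by_cases h : t.2 > 0
    · simp [pc, h]
    · simp [pc, h]

lemma foldl_altStep_snd (l : List ((Int × Int) × Int)) (b : Int) (cs : List (Int × Int)) :
    (l.foldl altStep (b, cs)).2 = cs ++ pc l := by
  induction l generalizing b cs with
  | nil => simp [pc]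
  | cons t ts ih =>
    simp only [List.foldl_cons, altStep, pc]
    rw [ih]
    split_ifs <;> simp

-- B collapsed onto the prefix
def outerC : List ((Int × Int) × Int) → Int → Int
  | [], b => b
  | t :: ps, b => max (outerC ps b) (t.2 + altQ t.1.2 (pc ps))

lemma foldl_altStep_fst (P : List ((Int × Int) × Int)) (b : Int) :
    (P.reverse.foldl altStep (b, [])).1 = outerC P b := by
  induction P generalizing b with
  | nil => rfl
  | cons t ps ih =>
    rw [List.reverse_cons, List.foldl_append, List.foldl_cons, List.foldl_nil]
    show max (ps.reverse.foldl altStep (b, [])).1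
        (t.2 + altQ t.1.2 (ps.reverse.foldl altStep (b, [])).2) = _
    rw [ih, foldl_altStep_snd, List.nil_append, pc_reverse, altQ_reverse]
    rfl

-- A's inner fold shifts by vi
lemma inner_shift (e vi : Int) (ps : List ((Int × Int) × Int)) (q : Int) :
    ps.foldl (fun c u => if u.1.1 > e then max c (vi + u.2) else c) (vi + q) =
      vi + ps.foldl (fun q u => if u.1.1 > e then max q u.2 else q) q := by
  induction ps generalizing q with
  | nil => rfl
  | cons u ps ih =>
    simp only [List.foldl_cons]
    by_cases h : u.1.1 > e
    · simp only [h, if_true]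
      rw [show max (vi + q) (vi + u.2) = vi + max q u.2 by omega]
      exact ih _
    · simp only [h, if_false]
      exact ih _

-- dropping non-positive candidates does not change the max-fold
lemma fold_pc (e : Int) (ps : List ((Int × Int) × Int)) (q : Int) (hq : 0 ≤ q) :
    ps.foldl (fun q u => if u.1.1 > e then max q u.2 else q) q = mq e (pc ps) q := by
  induction ps generalizing q with
  | nil => rfl
  | cons u ps ih =>
    simp only [List.foldl_cons, pc]
    by_cases hv : u.2 > 0
    · simp only [hv, if_true]
      simp only [mq, List.foldl_cons]
      by_cases h : u.1.1 > e
      · simp only [h, if_true]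
        exact ih _ (by omega)
      · simp only [h, if_false]
        exact ih _ hq
    · simp only [hv, if_false]
      rw [show (if u.1.1 > e then max q u.2 else q) = q by split_ifs <;> omega]
      exact ih _ hq

lemma outerP_max (ps : List ((Int × Int) × Int)) (c m : Int) :
    outerP ps (max c m) = max (outerP ps m) c := by
  induction ps generalizing m with
  | nil => exact max_comm c m
  | cons t l ih =>
    simp only [outerP]
    rw [show max (l.foldl (fun c u => if u.1.1 > t.1.2 then max c (t.2 + u.2) else c) t.2) (max c m)
        = max c (max (l.foldl (fun c u => if u.1.1 > t.1.2 then max c (t.2 + u.2) else c) t.2) m) by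
      omega]
    exact ih _

lemma outerP_eq_outerC (P : List ((Int × Int) × Int)) :
    outerP P 0 = outerC P 0 := by
  induction P with
  | nil => rfl
  | cons t ps ih =>
    simp only [outerP, outerC]
    have hI : ps.foldl (fun c u => if u.1.1 > t.1.2 then max c (t.2 + u.2) else c) t.2
        = t.2 + altQ t.1.2 (pc ps) := by
      have h := inner_shift t.1.2 t.2 ps 0
      rw [add_zero] at h
      rw [h, fold_pc t.1.2 ps 0 le_rfl, altQ_eq_mq]
    rw [hI, show max (t.2 + altQ t.1.2 (pc ps)) (0:Int)
        = max (t.2 + altQ t.1.2 (pc ps)) 0 from rfl, outerP_max, ih]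

-- ===== VERDICT (by name: the statement is the Claim_ definition above) =====
theorem maximumIncome_spec : Claim_equal_maximumIncome := by
  intro T limit _
  show maximumIncome T limit = maximumIncome_alt T limit
  rw [maximumIncome, aOuter_eq, List.drop_zero, outerL_prefix, outerP_eq_outerC,
    maximumIncome_alt, foldl_altStep_fst]
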